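-- pv_equiv track=rewrite | github.com/IsakWong/mutagent | src/mutagent/builtins/block_handlers.py | _parse_ask_block
-- ===== SOURCE A (Python) =====
-- def _parse_ask_block(lines):
--     """Parse ask block lines into question and options.
--
--     Lines starting with ``- `` are treated as option lines. All non-empty
--     lines before the first option form the question text.
--
--     Args:
--         lines: List of block content lines.
--
--     Returns:
--         Tuple of (question_str, options_list).
--     """
--     question_parts = []
--     options = []
--     in_options = False
--     for line in lines:
--         if line.startswith('- '):
--             in_options = True
--             options.append(line[2:])
--         elif not in_options and line.strip():
--             question_parts.append(line)
--     return '\n'.join(question_parts), options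
-- ===== SOURCE B (Python) =====
-- def _parse_ask_block(lines):
--     first = next((i for i, l in enumerate(lines) if l.startswith('- ')), len(lines))
--     question = '\n'.join(l for l in lines[:first] if l.strip())
--     options = [l[2:] for l in lines if l.startswith('- ')]
--     return question, options
-- ===== Notes on version B (the rewrite author's own statement) =====
-- stated objective: simpler
-- what changed: Replaced the stateful single-pass flag loop with a boundary search (index of the first option line) plus two independent filtered passes: question from the non-blank lines before the boundary, options from all '- ' lines.
import Mathlib
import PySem

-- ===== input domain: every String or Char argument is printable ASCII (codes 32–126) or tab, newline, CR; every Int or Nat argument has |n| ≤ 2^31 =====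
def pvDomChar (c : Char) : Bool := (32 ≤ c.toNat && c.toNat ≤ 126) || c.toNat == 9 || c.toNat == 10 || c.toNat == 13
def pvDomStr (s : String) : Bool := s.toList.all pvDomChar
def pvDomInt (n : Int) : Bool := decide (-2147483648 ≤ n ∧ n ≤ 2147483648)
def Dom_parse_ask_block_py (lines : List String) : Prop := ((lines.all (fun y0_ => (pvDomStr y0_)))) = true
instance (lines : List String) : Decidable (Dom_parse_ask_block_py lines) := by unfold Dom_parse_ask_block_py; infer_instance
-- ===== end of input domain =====

-- B replaces A's stateful flag loop by a boundary search plus two independent filtered passes (simpler decomposition, same cost).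


-- ===== PORT A =====
-- one fold step of A's loop over state (question_parts, options, in_options)
def pvStepA (st : List String × List String × Bool) (line : String) : List String × List String × Bool :=
  if PySem.Str.startswith line "- " then
    (st.1, st.2.1 ++ [PySem.Str.slice line (some 2) none], true)
  else if !st.2.2 && PySem.Str.strip line ≠ "" then
    (st.1 ++ [line], st.2.1, st.2.2)
  else st

def parse_ask_block_py (lines : List String) : String × List String :=
  let st := lines.foldl pvStepA ([], [], false)
  (PySem.Str.join "\n" st.1, st.2.1)

-- ===== PORT B =====
def parse_ask_block_py_alt (lines : List String) : String × List String :=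
  let first := (lines.findIdx? (fun l => PySem.Str.startswith l "- ")).getD lines.length
  let question := PySem.Str.join "\n" ((lines.take first).filter (fun l => PySem.Str.strip l ≠ ""))
  let options := (lines.filter (fun l => PySem.Str.startswith l "- ")).map
    (fun l => PySem.Str.slice l (some 2) none)
  (question, options)

-- ===== PRECONDITION & SPEC =====
def Spec_parse_ask_block_py (lines : List String) (out : String × List String) : Prop := out = parse_ask_block_py_alt lines
instance (lines : List String) (out : String × List String) : Decidable (Spec_parse_ask_block_py lines out) := by unfold Spec_parse_ask_block_py; infer_instance

-- ===== CLAIM (what is proved, stated in full; the proofs are below) =====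
def Claim_equal_parse_ask_block_py : Prop := ∀ (lines : List String), Dom_parse_ask_block_py lines → Spec_parse_ask_block_py lines (parse_ask_block_py lines)

-- ===== LEMMAS AND PROOFS =====

-- once in_options is true, A only collects option suffixes
theorem pvFoldA_true (lines : List String) (qp opts : List String) :
    lines.foldl pvStepA (qp, opts, true)
      = (qp, opts ++ (lines.filter (fun l => PySem.Str.startswith l "- ")).map
          (fun l => PySem.Str.slice l (some 2) none), true) := by
  induction lines generalizing opts with
  | nil => simp
  | cons l ls ih =>
    by_cases h : PySem.Chars.startswith l.toList ['-', ' '] = true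
    · simp [pvStepA, h, ih]
    · simp [pvStepA, h, ih]

-- from in_options = false, A's fold equals B's two passes (boundary via findIdx?)
theorem pvFoldA_false (lines : List String) (qp opts : List String) :
    lines.foldl pvStepA (qp, opts, false)
      = (qp ++ (lines.take ((lines.findIdx? (fun l => PySem.Str.startswith l "- ")).getD lines.length)).filter
            (fun l => PySem.Str.strip l ≠ ""),
         opts ++ (lines.filter (fun l => PySem.Str.startswith l "- ")).map
            (fun l => PySem.Str.slice l (some 2) none),
         lines.any (fun l => PySem.Str.startswith l "- ")) := by
  induction lines generalizing qp opts with
  | nil => simp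
  | cons l ls ih =>
    by_cases h : PySem.Chars.startswith l.toList ['-', ' '] = true
    · simp [pvStepA, h, List.findIdx?_cons, pvFoldA_true]
    · have hfirst : ((ls.findIdx? (fun l => PySem.Str.startswith l "- ")).map (· + 1)).getD (ls.length + 1)
          = (ls.findIdx? (fun l => PySem.Str.startswith l "- ")).getD ls.length + 1 := by
        cases ls.findIdx? (fun l => PySem.Str.startswith l "- ") <;> simp
      by_cases hs : PySem.Str.strip l ≠ ""
      · simp [pvStepA, h, hs, List.findIdx?_cons, ih]
      · simp [pvStepA, h, hs, List.findIdx?_cons, ih]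

-- ===== VERDICT (by name: the statement is the Claim_ definition above) =====
theorem parse_ask_block_py_spec : Claim_equal_parse_ask_block_py := by
  intro lines _
  unfold Spec_parse_ask_block_py parse_ask_block_py parse_ask_block_py_alt
  simp [pvFoldA_false]
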